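-- pv_equiv track=rewrite | github.com/ezequielfrias20/exam-mutant | src/mutant.py | Mutant
-- ===== SOURCE A (Python) =====
-- def Mutant(adn):
--     try:
--         '''
--             Funcion que permite verificar si la matriz es correcta
--             siendo NxN y que solo tenga las letras A T C G.
--             Devuelve True si todo esta correcto
--         '''
--         def check(adn):
--             contador=0
--             verificacion=0
--             for elemento in adn:
--                 for letra in elemento:
--                     if letra=="A" or letra=="T" or letra=="C" or letra=="G":
--                         contador+=1
--                 if contador!=len(adn):
--                     raise Exception
--                 else:
--                     verificacion+=1
--                     contador=0
--             return verificacion==len(adn)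
--         '''
--             Esta funcion permita verificar si es mutante
--             de manera horizontal
--         '''
--         def is_mutant_horizontal(adn):
--             mutacion=False
--             for elemento in adn:
--                 for letra in elemento:
--                     if elemento.count(letra)>=4:
--                         mutan=letra+letra+letra+letra
--                         if mutan in elemento:
--                             mutacion= True
--                             break
--             return mutacion
--         '''
--             Esta funcion permite crear una nueva lista con los
--             valores verticales y se aplica
--             la funcion is_mutant_horizontal
--         '''
--         def is_mutant_vertical(adn):
--             vertical=""
--             new_adn=[]
--             for i in range(len(adn)):
--                 for a in range(len(adn)):
--                     vertical+=adn[a][i]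
--                 new_adn.append(vertical)
--                 vertical=""
--             return is_mutant_horizontal(new_adn)
--         '''
--             funcion que permite encontrar las diagonales de la matriz
--         '''
--         def get_diagonals(matrix):
--             n = len(matrix)
--             # diagonals_1 = []  # lower-left-to-upper-right diagonals
--             # diagonals_2 = []  # upper-left-to-lower-right diagonals
--             for p in range(2*n-1):
--                 yield [matrix[p-q][q] for q in range(max(0, p - n + 1), min(p, n - 1) + 1)]
--                 yield [matrix[n-p+q-1][q] for q in range(max(0, p - n + 1), min(p, n - 1) + 1)]
--         '''
--             Esta funcion permite crear una nueva lista con los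
--             valores de todas las diagonales y se aplica
--             la funcion is_mutant_horizontal para ver si es mutante
--         '''
--         def is_mutant_oblicua(adn):
--             new=[]
--             new_word=""
--             for i in get_diagonals(adn):
--                 for element in i:
--                     new_word+=element
--                 new.append(new_word)
--                 new_word=""
--             return is_mutant_horizontal(new)
--
--         check(adn)
--         if is_mutant_horizontal(adn):
--             return True
--         elif is_mutant_oblicua(adn):
--             return True
--         elif is_mutant_vertical(adn):
--             return True
--         else:
--             return False
--
--     except Exception:
--         return None
-- ===== SOURCE B (Python) =====
-- def Mutant(adn):
--     n = len(adn)
--     for row in adn: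
--         if row.count('A') + row.count('T') + row.count('C') + row.count('G') != n:
--             return None
--     # horizontal: scan each full row for a run of 4 equal characters
--     for row in adn:
--         for j in range(len(row) - 3):
--             if row[j] == row[j+1] == row[j+2] == row[j+3]:
--                 return True
--     # vertical / diagonal / anti-diagonal: one scan over the n x n square
--     for i in range(n):
--         for j in range(n):
--             if i + 3 < n and adn[i][j] == adn[i+1][j] == adn[i+2][j] == adn[i+3][j]:
--                 return True
--             if i + 3 < n and j + 3 < n and adn[i][j] == adn[i+1][j+1] == adn[i+2][j+2] == adn[i+3][j+3]:
--                 return True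
--             if i >= 3 and j + 3 < n and adn[i][j] == adn[i-1][j+1] == adn[i-2][j+2] == adn[i-3][j+3]:
--                 return True
--     return False
-- ===== Notes on version B (the rewrite author's own statement) =====
-- stated objective: alternative
-- what changed: Replaces A's per-letter count/substring rescans and materialised diagonal/column strings with one direct cell scan checking each cell's right/down/diagonal run of 4 (O(n^2) scan vs A's O(n^3) rescans on valid matrices; random invalid inputs fail validation first, so no measured speed-up).
import Mathlib
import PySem

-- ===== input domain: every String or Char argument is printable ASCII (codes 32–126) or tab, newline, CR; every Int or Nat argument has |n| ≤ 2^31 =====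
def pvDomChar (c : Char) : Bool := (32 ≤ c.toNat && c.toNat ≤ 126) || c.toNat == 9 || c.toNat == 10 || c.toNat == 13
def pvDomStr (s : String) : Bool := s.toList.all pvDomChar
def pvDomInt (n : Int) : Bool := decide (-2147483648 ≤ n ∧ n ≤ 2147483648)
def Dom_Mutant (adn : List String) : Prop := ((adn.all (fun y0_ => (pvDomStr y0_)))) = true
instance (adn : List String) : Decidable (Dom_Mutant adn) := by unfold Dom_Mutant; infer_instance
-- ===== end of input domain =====

-- B replaces A's per-letter count/substring rescans and materialised diagonal/column
-- strings with a single direct cell scan for runs of 4 (objective: alternative).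


-- ===== PORT A =====
-- check: per row, the count of A/T/C/G letters must equal len(adn), else raise -> whole call returns None
def aLetter (c : Char) : Bool := c == 'A' || c == 'T' || c == 'C' || c == 'G'
def aCheckRow (n : Nat) (e : List Char) : Bool :=
  (e.foldl (fun acc letra => if aLetter letra then acc + 1 else acc) (0 : Int)) == (n : Int)
-- is_mutant_horizontal: for each letter of a row: count >= 4 and letra*4 a substring
def aRunRow (e : List Char) : Bool :=
  e.any (fun letra => decide (4 ≤ e.count letra) && PySem.Chars.isIn [letra, letra, letra, letra] e)
def aHor (rows : List (List Char)) : Bool := rows.any aRunRow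
-- adn[a][i] (either indexing may raise IndexError = none)
def aIdx (rows : List (List Char)) (a i : Nat) : Option Char := do
  let row ← rows[a]?
  row[i]?
-- is_mutant_vertical: builds the column strings, then applies is_mutant_horizontal
def aVertCol (rows : List (List Char)) (n i : Nat) : Option (List Char) :=
  (List.range n).foldlM (fun acc a => do
    let ch ← aIdx rows a i
    pure (acc ++ [ch])) ([] : List Char)
def aVert (rows : List (List Char)) (n : Nat) : Option (List (List Char)) :=
  (List.range n).foldlM (fun acc i => do
    let col ← aVertCol rows n i
    pure (acc ++ [col])) ([] : List (List Char))
-- get_diagonals: for p in range(2n-1): [matrix[p-q][q]] and [matrix[n-p+q-1][q]] for q in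
-- range(max(0,p-n+1), min(p,n-1)+1).  All Python index values here are nonnegative, so they
-- are written with Nat arithmetic: p+1-n = max(0,p-n+1), min (p+1) n = min(p,n-1)+1, and
-- n+q-(p+1) = n-p+q-1 (exact for q ≥ p+1-n).
def aDiag1 (rows : List (List Char)) (n p : Nat) : Option (List Char) :=
  (List.range' (p + 1 - n) (min (p + 1) n - (p + 1 - n))).mapM (fun q => aIdx rows (p - q) q)
def aDiag2 (rows : List (List Char)) (n p : Nat) : Option (List Char) :=
  (List.range' (p + 1 - n) (min (p + 1) n - (p + 1 - n))).mapM (fun q => aIdx rows (n + q - (p + 1)) q)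
-- is_mutant_oblicua: concatenate each diagonal into one string, collect, then horizontal
def aDiags (rows : List (List Char)) (n : Nat) : Option (List (List Char)) :=
  (List.range (2 * n - 1)).foldlM (fun acc p => do
    let d1 ← aDiag1 rows n p
    let d2 ← aDiag2 rows n p
    pure (acc ++ [d1, d2])) ([] : List (List Char))
def Mutant (adn : List String) : Option Bool :=
  if adn.all (fun e => aCheckRow adn.length e.toList) then
    if aHor (adn.map String.toList) then some true
    else
      match aDiags (adn.map String.toList) adn.length with
      | none => none
      | some ds =>
        if aHor ds then some true
        else
          match aVert (adn.map String.toList) adn.length with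
          | none => none
          | some vs => if aHor vs then some true else some false
  else none

-- ===== PORT B =====
def bValidRow (n : Nat) (e : List Char) : Bool :=
  (e.count 'A' + e.count 'T' + e.count 'C' + e.count 'G') == n
-- total cell access; after validation every index B uses is in range
def bG (rows : List (List Char)) (i j : Nat) : Char := (rows.getD i []).getD j ' '
def bRowHit (e : List Char) : Bool :=
  (List.range (e.length - 3)).any (fun j =>
    e.getD j ' ' == e.getD (j + 1) ' ' && e.getD (j + 1) ' ' == e.getD (j + 2) ' ' &&
    e.getD (j + 2) ' ' == e.getD (j + 3) ' ')
def bCell (rows : List (List Char)) (n i j : Nat) : Bool :=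
  (decide (i + 3 < n) &&
    (bG rows i j == bG rows (i + 1) j && bG rows (i + 1) j == bG rows (i + 2) j &&
     bG rows (i + 2) j == bG rows (i + 3) j)) ||
  (decide (i + 3 < n) && decide (j + 3 < n) &&
    (bG rows i j == bG rows (i + 1) (j + 1) && bG rows (i + 1) (j + 1) == bG rows (i + 2) (j + 2) &&
     bG rows (i + 2) (j + 2) == bG rows (i + 3) (j + 3))) ||
  (decide (3 ≤ i) && decide (j + 3 < n) &&
    (bG rows i j == bG rows (i - 1) (j + 1) && bG rows (i - 1) (j + 1) == bG rows (i - 2) (j + 2) &&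
     bG rows (i - 2) (j + 2) == bG rows (i - 3) (j + 3)))
def Mutant_alt (adn : List String) : Option Bool :=
  if adn.all (fun e => bValidRow adn.length e.toList) then
    some ((adn.map String.toList).any bRowHit ||
      (List.range adn.length).any (fun i =>
        (List.range adn.length).any (fun j => bCell (adn.map String.toList) adn.length i j)))
  else none

-- ===== PRECONDITION & SPEC =====
def Spec_Mutant (adn : List String) (out : Option Bool) : Prop := out = Mutant_alt adn
instance (adn : List String) (out : Option Bool) : Decidable (Spec_Mutant adn out) := by unfold Spec_Mutant; infer_instance

-- ===== CLAIM (what is proved, stated in full; the proofs are below) =====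
def Claim_equal_Mutant : Prop := ∀ (adn : List String), Dom_Mutant adn → Spec_Mutant adn (Mutant adn)

-- ===== LEMMAS AND PROOFS =====

theorem countP_letters (e : List Char) :
    e.countP aLetter = e.count 'A' + e.count 'T' + e.count 'C' + e.count 'G' := by
  induction e with
  | nil => rfl
  | cons c t ih =>
    simp only [List.countP_cons, List.count_cons, aLetter, Bool.or_eq_true, beq_iff_eq]
    by_cases hA : c = 'A' <;> by_cases hT : c = 'T' <;> by_cases hC : c = 'C' <;>
      by_cases hG : c = 'G' <;> simp_all <;> omega

theorem Mutant_check_eq (n : Nat) (e : List Char) : aCheckRow n e = bValidRow n e := by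
  unfold aCheckRow bValidRow
  rw [PySem.List.foldl_if_add_one, countP_letters]
  rw [Bool.eq_iff_iff]
  simp
  omega

-- positional run-of-4 characterisation
def RunAt (l : List Char) (j : Nat) : Prop :=
  j + 3 < l.length ∧ l.getD j ' ' = l.getD (j+1) ' ' ∧ l.getD (j+1) ' ' = l.getD (j+2) ' ' ∧
    l.getD (j+2) ' ' = l.getD (j+3) ' '

theorem run_infix_iff (l : List Char) : (∃ c, [c, c, c, c] <:+: l) ↔ ∃ j, RunAt l j := by
  constructor
  · rintro ⟨c, s, t, rfl⟩
    refine ⟨s.length, ?_, ?_, ?_, ?_⟩ <;>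
      simp [List.getD_eq_getElem?_getD]
  · rintro ⟨j, hj, h1, h2, h3⟩
    have hlen : 4 ≤ (l.drop j).length := by simp; omega
    obtain ⟨a, t1, he1⟩ : ∃ a t, l.drop j = a :: t := by
      cases h : l.drop j with
      | nil => rw [h] at hlen; simp at hlen
      | cons a t => exact ⟨a, t, rfl⟩
    obtain ⟨b, t2, he2⟩ : ∃ b t, t1 = b :: t := by
      cases t1 with
      | nil => rw [he1] at hlen; simp at hlen
      | cons b t => exact ⟨b, t, rfl⟩
    obtain ⟨c2, t3, he3⟩ : ∃ c t, t2 = c :: t := by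
      cases t2 with
      | nil => rw [he1, he2] at hlen; simp at hlen
      | cons c t => exact ⟨c, t, rfl⟩
    obtain ⟨d, t4, he4⟩ : ∃ d t, t3 = d :: t := by
      cases t3 with
      | nil => rw [he1, he2, he3] at hlen; simp at hlen
      | cons d t => exact ⟨d, t, rfl⟩
    have hd : l.drop j = a :: b :: c2 :: d :: t4 := by rw [he1, he2, he3, he4]
    have gk : ∀ k : Nat, l.getD (j + k) ' ' = (a :: b :: c2 :: d :: t4).getD k ' ' := by
      intro k
      rw [List.getD_eq_getElem?_getD, List.getD_eq_getElem?_getD, ← hd, List.getElem?_drop]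
    have ga : l.getD j ' ' = a := by have := gk 0; simpa using this
    have gb : l.getD (j+1) ' ' = b := by have := gk 1; simpa using this
    have gc : l.getD (j+2) ' ' = c2 := by have := gk 2; simpa using this
    have gd : l.getD (j+3) ' ' = d := by have := gk 3; simpa using this
    refine ⟨a, ?_⟩
    have hb : b = a := by rw [← ga, ← gb, h1]
    have hc : c2 = a := by rw [← ga, ← gc, h1, h2]
    have hdd : d = a := by rw [← ga, ← gd, h1, h2, h3]
    have hd4 : l.drop j = a :: a :: a :: a :: t4 := by rw [hd, hb, hc, hdd]
    have hpre : [a, a, a, a] <+: l.drop j := ⟨t4, by rw [hd4]; rfl⟩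
    exact hpre.isInfix.trans (List.drop_suffix j l).isInfix

theorem aRunRow_iff (e : List Char) : aRunRow e = true ↔ ∃ c, [c, c, c, c] <:+: e := by
  unfold aRunRow
  rw [List.any_eq_true]
  constructor
  · rintro ⟨c, _, h⟩
    rw [Bool.and_eq_true] at h
    exact ⟨c, (PySem.Chars.isIn_iff_infix _ _).1 h.2⟩
  · rintro ⟨c, hinf⟩
    have hsub : List.Sublist [c, c, c, c] e := hinf.sublist
    refine ⟨c, hsub.mem (by simp), ?_⟩
    rw [Bool.and_eq_true]
    refine ⟨decide_eq_true ?_, (PySem.Chars.isIn_iff_infix _ _).2 hinf⟩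
    calc 4 = List.count c [c, c, c, c] := by simp
    _ ≤ e.count c := hsub.count_le c

theorem bRowHit_iff (e : List Char) : bRowHit e = true ↔ ∃ j, RunAt e j := by
  unfold bRowHit
  rw [List.any_eq_true]
  constructor
  · rintro ⟨j, hj, h⟩
    rw [List.mem_range] at hj
    simp only [Bool.and_eq_true, beq_iff_eq] at h
    exact ⟨j, by omega, h.1.1, h.1.2, h.2⟩
  · rintro ⟨j, hj, h1, h2, h3⟩
    refine ⟨j, List.mem_range.2 (by omega), ?_⟩
    simp only [Bool.and_eq_true, beq_iff_eq]
    exact ⟨⟨h1, h2⟩, h3⟩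

theorem aRunRow_eq_bRowHit : aRunRow = bRowHit := by
  funext e
  rw [Bool.eq_iff_iff, aRunRow_iff, bRowHit_iff, run_infix_iff]

theorem mapM_some {α β : Type} (L : List α) (f : α → Option β) (g : α → β)
    (h : ∀ a ∈ L, f a = some (g a)) : L.mapM f = some (L.map g) := by
  induction L with
  | nil => rfl
  | cons x xs ih =>
    simp [List.mapM_cons, h x (by simp), ih (fun a ha => h a (by simp [ha]))]

theorem foldlM_append1_some {α β : Type} (L : List α) (f : α → Option β) (g : α → β)
    (h : ∀ a ∈ L, f a = some (g a)) (acc : List β) :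
    L.foldlM (fun acc a => do let b ← f a; pure (acc ++ [b])) acc = some (acc ++ L.map g) := by
  induction L generalizing acc with
  | nil => simp
  | cons x xs ih =>
    have := ih (fun a ha => h a (by simp [ha])) (acc ++ [g x])
    simp only [List.foldlM_cons, h x (by simp)]
    simpa using this

theorem foldlM_append2_some {α β : Type} (L : List α) (f1 f2 : α → Option β) (g1 g2 : α → β)
    (h1 : ∀ a ∈ L, f1 a = some (g1 a)) (h2 : ∀ a ∈ L, f2 a = some (g2 a)) (acc : List β) :
    L.foldlM (fun acc a => do let b ← f1 a; let c ← f2 a; pure (acc ++ [b, c])) acc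
      = some (acc ++ L.flatMap (fun a => [g1 a, g2 a])) := by
  induction L generalizing acc with
  | nil => simp
  | cons x xs ih =>
    have := ih (fun a ha => h1 a (by simp [ha])) (fun a ha => h2 a (by simp [ha])) (acc ++ [g1 x, g2 x])
    simp only [List.foldlM_cons, h1 x (by simp), h2 x (by simp)]
    simpa using this

-- the lists A materialises, written through B's total cell access
def ColL (rows : List (List Char)) (n i : Nat) : List Char :=
  (List.range n).map (fun a => bG rows a i)
def D1L (rows : List (List Char)) (n p : Nat) : List Char :=
  (List.range' (p + 1 - n) (min (p + 1) n - (p + 1 - n))).map (fun q => bG rows (p - q) q)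
def D2L (rows : List (List Char)) (n p : Nat) : List Char :=
  (List.range' (p + 1 - n) (min (p + 1) n - (p + 1 - n))).map (fun q => bG rows (n + q - (p + 1)) q)

theorem getD_map_range' (s n k : Nat) (g : Nat → Char) (hk : k < n) :
    ((List.range' s n).map g).getD k ' ' = g (s + k) := by
  have hlen : k < ((List.range' s n).map g).length := by simpa using hk
  rw [List.getD_eq_getElem?_getD, List.getElem?_eq_getElem hlen]
  simp [List.getElem_range']

theorem existsRun_map_range' (s n : Nat) (g : Nat → Char) :
    (∃ t, RunAt ((List.range' s n).map g) t) ↔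
    ∃ q, s ≤ q ∧ q + 3 < s + n ∧ g q = g (q+1) ∧ g (q+1) = g (q+2) ∧ g (q+2) = g (q+3) := by
  constructor
  · rintro ⟨t, ht, e1, e2, e3⟩
    have hn : t + 3 < n := by simpa using ht
    have r0 := getD_map_range' s n t g (by omega)
    have r1 := getD_map_range' s n (t+1) g (by omega)
    have r2 := getD_map_range' s n (t+2) g (by omega)
    have r3 := getD_map_range' s n (t+3) g (by omega)
    rw [r0, r1] at e1; rw [r1, r2] at e2; rw [r2, r3] at e3
    refine ⟨s + t, by omega, by omega, ?_, ?_, ?_⟩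
    · rw [show s + t + 1 = s + (t+1) by omega]; exact e1
    · rw [show s + t + 1 = s + (t+1) by omega, show s + t + 2 = s + (t+2) by omega]; exact e2
    · rw [show s + t + 2 = s + (t+2) by omega, show s + t + 3 = s + (t+3) by omega]; exact e3
  · rintro ⟨q, hq, hqn, e1, e2, e3⟩
    have r0 := getD_map_range' s n (q-s) g (by omega)
    have r1 := getD_map_range' s n (q-s+1) g (by omega)
    have r2 := getD_map_range' s n (q-s+2) g (by omega)
    have r3 := getD_map_range' s n (q-s+3) g (by omega)
    refine ⟨q - s, ?_, ?_, ?_, ?_⟩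
    · simp; omega
    · rw [r0, r1, show s + (q-s) = q by omega, show s + (q-s+1) = q + 1 by omega]; exact e1
    · rw [r1, r2, show s + (q-s+1) = q+1 by omega, show s + (q-s+2) = q + 2 by omega]; exact e2
    · rw [r2, r3, show s + (q-s+2) = q+2 by omega, show s + (q-s+3) = q + 3 by omega]; exact e3

theorem existsRun_map_range (n : Nat) (g : Nat → Char) :
    (∃ t, RunAt ((List.range n).map g) t) ↔
    ∃ q, q + 3 < n ∧ g q = g (q+1) ∧ g (q+1) = g (q+2) ∧ g (q+2) = g (q+3) := by
  rw [List.range_eq_range', existsRun_map_range' 0 n g]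
  constructor
  · rintro ⟨q, _, h⟩; exact ⟨q, by omega, h.2⟩
  · rintro ⟨q, hq, h⟩; exact ⟨q, by omega, by omega, h⟩

-- Prop forms of B's three cell tests
def VCell (rows : List (List Char)) (n i j : Nat) : Prop :=
  i + 3 < n ∧ bG rows i j = bG rows (i+1) j ∧ bG rows (i+1) j = bG rows (i+2) j ∧
    bG rows (i+2) j = bG rows (i+3) j
def DCell (rows : List (List Char)) (n i j : Nat) : Prop :=
  i + 3 < n ∧ j + 3 < n ∧ bG rows i j = bG rows (i+1) (j+1) ∧
    bG rows (i+1) (j+1) = bG rows (i+2) (j+2) ∧ bG rows (i+2) (j+2) = bG rows (i+3) (j+3)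
def ACell (rows : List (List Char)) (n i j : Nat) : Prop :=
  3 ≤ i ∧ j + 3 < n ∧ bG rows i j = bG rows (i-1) (j+1) ∧
    bG rows (i-1) (j+1) = bG rows (i-2) (j+2) ∧ bG rows (i-2) (j+2) = bG rows (i-3) (j+3)

theorem bCell_iff (rows : List (List Char)) (n i j : Nat) :
    bCell rows n i j = true ↔ (VCell rows n i j ∨ DCell rows n i j ∨ ACell rows n i j) := by
  simp only [bCell, Bool.or_eq_true, Bool.and_eq_true, beq_iff_eq, decide_eq_true_eq,
    VCell, DCell, ACell]
  tauto

-- the central combinatorial fact: runs on A's diagonal/column lists are exactly B's cell hits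
theorem diagvert_iff (rows : List (List Char)) (n : Nat) :
    ((∃ p, p < 2*n-1 ∧ ((∃ t, RunAt (D1L rows n p) t) ∨ ∃ t, RunAt (D2L rows n p) t)) ∨
     (∃ i, i < n ∧ ∃ t, RunAt (ColL rows n i) t))
    ↔ (∃ i, i < n ∧ ∃ j, j < n ∧ (VCell rows n i j ∨ DCell rows n i j ∨ ACell rows n i j)) := by
  simp only [D1L, D2L, ColL, existsRun_map_range', existsRun_map_range]
  constructor
  · rintro (⟨p, hp, (⟨q, hq1, hq2, e1, e2, e3⟩ | ⟨q, hq1, hq2, e1, e2, e3⟩)⟩ | ⟨i, hi, q, hq, e1, e2, e3⟩)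
    · -- anti-diagonal (lower-left to upper-right)
      refine ⟨p - q, by omega, q, by omega, Or.inr (Or.inr ⟨by omega, by omega, ?_, ?_, ?_⟩)⟩
      · rw [show p - q - 1 = p - (q+1) by omega]; exact e1
      · rw [show p - q - 1 = p - (q+1) by omega, show p - q - 2 = p - (q+2) by omega]; exact e2
      · rw [show p - q - 2 = p - (q+2) by omega, show p - q - 3 = p - (q+3) by omega]; exact e3
    · -- main diagonal (upper-left to lower-right)
      refine ⟨n + q - (p+1), by omega, q, by omega, Or.inr (Or.inl ⟨by omega, by omega, ?_, ?_, ?_⟩)⟩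
      · rw [show n + q - (p+1) + 1 = n + (q+1) - (p+1) by omega]; exact e1
      · rw [show n + q - (p+1) + 1 = n + (q+1) - (p+1) by omega,
            show n + q - (p+1) + 2 = n + (q+2) - (p+1) by omega]; exact e2
      · rw [show n + q - (p+1) + 2 = n + (q+2) - (p+1) by omega,
            show n + q - (p+1) + 3 = n + (q+3) - (p+1) by omega]; exact e3
    · -- column
      exact ⟨q, by omega, i, by omega, Or.inl ⟨by omega, e1, e2, e3⟩⟩
  · rintro ⟨i, hi, j, hj, (⟨hin, e1, e2, e3⟩ | ⟨hin, hjn, e1, e2, e3⟩ | ⟨hi3, hjn, e1, e2, e3⟩)⟩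
    · -- vertical run -> column j
      exact Or.inr ⟨j, by omega, i, by omega, e1, e2, e3⟩
    · -- main diagonal run -> D2 at p = n + j - (i+1)
      refine Or.inl ⟨n + j - (i+1), by omega, Or.inr ⟨j, by omega, by omega, ?_, ?_, ?_⟩⟩
      · rw [show n + j - (n + j - (i+1) + 1) = i by omega,
            show n + (j+1) - (n + j - (i+1) + 1) = i + 1 by omega]; exact e1
      · rw [show n + (j+1) - (n + j - (i+1) + 1) = i + 1 by omega,
            show n + (j+2) - (n + j - (i+1) + 1) = i + 2 by omega]; exact e2
      · rw [show n + (j+2) - (n + j - (i+1) + 1) = i + 2 by omega,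
            show n + (j+3) - (n + j - (i+1) + 1) = i + 3 by omega]; exact e3
    · -- anti-diagonal run -> D1 at p = i + j
      refine Or.inl ⟨i + j, by omega, Or.inl ⟨j, by omega, by omega, ?_, ?_, ?_⟩⟩
      · rw [show i + j - j = i by omega, show i + j - (j+1) = i - 1 by omega]; exact e1
      · rw [show i + j - (j+1) = i - 1 by omega, show i + j - (j+2) = i - 2 by omega]; exact e2
      · rw [show i + j - (j+2) = i - 2 by omega, show i + j - (j+3) = i - 3 by omega]; exact e3

theorem aIdx_some (rows : List (List Char)) (a i : Nat) (ha : a < rows.length)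
    (hi : i < (rows.getD a []).length) : aIdx rows a i = some (bG rows a i) := by
  unfold aIdx bG
  rw [List.getElem?_eq_getElem ha]
  have : rows.getD a [] = rows[a] := List.getD_eq_getElem rows [] ha
  rw [this] at hi ⊢
  simp [List.getElem?_eq_getElem hi]

-- ===== VERDICT (by name: the statement is the Claim_ definition above) =====
theorem Mutant_spec : Claim_equal_Mutant := by
  intro adn _
  unfold Spec_Mutant Mutant Mutant_alt
  have hcheck : (fun e : String => aCheckRow adn.length e.toList)
      = (fun e : String => bValidRow adn.length e.toList) :=
    funext fun e => Mutant_check_eq _ _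
  rw [hcheck]
  by_cases hv : adn.all (fun e => bValidRow adn.length e.toList) = true
  case neg => simp only [hv]; rfl
  rw [hv]
  simp only [if_true]
  -- notation
  have hrl : (adn.map String.toList).length = adn.length := by simp
  have V : ∀ e ∈ adn.map String.toList, adn.length ≤ e.length := by
    intro e he
    rw [List.mem_map] at he
    obtain ⟨s, hs, rfl⟩ := he
    have := (List.all_eq_true.1 hv) s hs
    unfold bValidRow at this
    rw [beq_iff_eq] at this
    calc adn.length = s.toList.countP aLetter := by rw [countP_letters]; omega
    _ ≤ s.toList.length := List.countP_le_length
  have hidx : ∀ a i : Nat, a < adn.length → i < adn.length →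
      aIdx (adn.map String.toList) a i = some (bG (adn.map String.toList) a i) := by
    intro a i ha hi
    refine aIdx_some _ a i (by omega) ?_
    have ha' : a < (adn.map String.toList).length := by omega
    have hmem : (adn.map String.toList).getD a [] ∈ adn.map String.toList := by
      rw [List.getD_eq_getElem _ _ ha']
      exact List.getElem_mem ha'
    have := V _ hmem
    omega
  have hcol : ∀ i, i < adn.length → aVertCol (adn.map String.toList) adn.length i
      = some (ColL (adn.map String.toList) adn.length i) := by
    intro i hi
    exact foldlM_append1_some _ _ _ (fun a ha => hidx a i (by simpa using ha) hi) []
  have hvert : aVert (adn.map String.toList) adn.length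
      = some ((List.range adn.length).map (ColL (adn.map String.toList) adn.length)) := by
    have := foldlM_append1_some (List.range adn.length)
      (aVertCol (adn.map String.toList) adn.length)
      (ColL (adn.map String.toList) adn.length)
      (fun i hi => hcol i (by simpa using hi)) []
    simpa [aVert] using this
  have hd1 : ∀ p, p < 2*adn.length - 1 → aDiag1 (adn.map String.toList) adn.length p
      = some (D1L (adn.map String.toList) adn.length p) := by
    intro p hp
    refine mapM_some _ _ _ ?_
    intro q hq
    rw [List.mem_range'] at hq
    obtain ⟨t, ht, rfl⟩ := hq
    exact hidx _ _ (by omega) (by omega)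
  have hd2 : ∀ p, p < 2*adn.length - 1 → aDiag2 (adn.map String.toList) adn.length p
      = some (D2L (adn.map String.toList) adn.length p) := by
    intro p hp
    refine mapM_some _ _ _ ?_
    intro q hq
    rw [List.mem_range'] at hq
    obtain ⟨t, ht, rfl⟩ := hq
    exact hidx _ _ (by omega) (by omega)
  have hdiags : aDiags (adn.map String.toList) adn.length
      = some ((List.range (2*adn.length - 1)).flatMap
          (fun p => [D1L (adn.map String.toList) adn.length p,
                     D2L (adn.map String.toList) adn.length p])) := by
    have := foldlM_append2_some (List.range (2*adn.length - 1))
      (aDiag1 (adn.map String.toList) adn.length) (aDiag2 (adn.map String.toList) adn.length)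
      (D1L (adn.map String.toList) adn.length) (D2L (adn.map String.toList) adn.length)
      (fun p hp => hd1 p (by simpa using hp)) (fun p hp => hd2 p (by simpa using hp)) []
    simpa [aDiags] using this
  rw [hdiags, hvert]
  -- both sides are now `some` of boolean combinations; compare the booleans
  have khor : aHor (adn.map String.toList) = (adn.map String.toList).any bRowHit := by
    unfold aHor; rw [aRunRow_eq_bRowHit]
  have ktail :
      (aHor ((List.range (2*adn.length - 1)).flatMap
          (fun p => [D1L (adn.map String.toList) adn.length p,
                     D2L (adn.map String.toList) adn.length p]))
        || aHor ((List.range adn.length).map (ColL (adn.map String.toList) adn.length)))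
      = (List.range adn.length).any (fun i =>
          (List.range adn.length).any (fun j => bCell (adn.map String.toList) adn.length i j)) := by
    rw [Bool.eq_iff_iff]
    unfold aHor
    rw [aRunRow_eq_bRowHit]
    simp only [Bool.or_eq_true, List.any_eq_true, List.mem_flatMap, List.mem_range, List.mem_map,
      List.mem_cons, List.not_mem_nil, or_false, bCell_iff]
    constructor
    · rintro (⟨e, ⟨p, hp, (rfl | rfl)⟩, he⟩ | ⟨e, ⟨i, hi, rfl⟩, he⟩)
      · have := (diagvert_iff (adn.map String.toList) adn.length).1
          (Or.inl ⟨p, hp, Or.inl ((bRowHit_iff _).1 he)⟩)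
        obtain ⟨i, hi, j, hj, hb⟩ := this
        exact ⟨i, hi, j, hj, hb⟩
      · have := (diagvert_iff (adn.map String.toList) adn.length).1
          (Or.inl ⟨p, hp, Or.inr ((bRowHit_iff _).1 he)⟩)
        obtain ⟨i, hi, j, hj, hb⟩ := this
        exact ⟨i, hi, j, hj, hb⟩
      · have := (diagvert_iff (adn.map String.toList) adn.length).1
          (Or.inr ⟨i, hi, (bRowHit_iff _).1 he⟩)
        obtain ⟨i', hi', j, hj, hb⟩ := this
        exact ⟨i', hi', j, hj, hb⟩
    · rintro ⟨i, hi, j, hj, hb⟩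
      have := (diagvert_iff (adn.map String.toList) adn.length).2 ⟨i, hi, j, hj, hb⟩
      rcases this with ⟨p, hp, (hr | hr)⟩ | ⟨i', hi', hr⟩
      · exact Or.inl ⟨_, ⟨p, hp, Or.inl rfl⟩, (bRowHit_iff _).2 hr⟩
      · exact Or.inl ⟨_, ⟨p, hp, Or.inr rfl⟩, (bRowHit_iff _).2 hr⟩
      · exact Or.inr ⟨_, ⟨i', hi', rfl⟩, (bRowHit_iff _).2 hr⟩
  -- collapse the if-chain
  cases h1 : aHor (adn.map String.toList) <;>
    cases h2 : aHor ((List.range (2*adn.length - 1)).flatMap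
        (fun p => [D1L (adn.map String.toList) adn.length p,
                   D2L (adn.map String.toList) adn.length p])) <;>
    cases h3 : aHor ((List.range adn.length).map (ColL (adn.map String.toList) adn.length)) <;>
    simp only [if_true] <;>
    rw [← khor, h1, ← ktail, h2, h3] <;> rfl
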